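-- pv_equiv track=rewrite | github.com/wilduk/PO164404 | lancuchy.py | z3
-- ===== SOURCE A (Python) =====
-- def z3(a, b):
--     slowo = []
--     zdania = [a, b]
--     for litera in range(97, 123):
--         slowo += chr(litera) + chr(litera).upper()
--     for zdanie in zdania:
--         for literaa in zdanie:
--             for literab in slowo:
--                 if literaa == literab:
--                     slowo.remove(literaa)
--                     break
--     return set(slowo)
-- ===== SOURCE B (Python) =====
-- def z3(a, b):
--     s = a + b
--     return {c for k in range(97, 123) for c in (chr(k), chr(k - 32)) if c not in s}
-- ===== Notes on version B (the rewrite author's own statement) =====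
-- stated objective: simpler
-- what changed: B inverts the traversal: instead of scanning both inputs and removing each matched letter from a mutable candidate list (an inner scan per input character), B makes a single pass over the fixed 52-letter alphabet and keeps each letter absent from the concatenated inputs via a set comprehension.
import Mathlib
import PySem

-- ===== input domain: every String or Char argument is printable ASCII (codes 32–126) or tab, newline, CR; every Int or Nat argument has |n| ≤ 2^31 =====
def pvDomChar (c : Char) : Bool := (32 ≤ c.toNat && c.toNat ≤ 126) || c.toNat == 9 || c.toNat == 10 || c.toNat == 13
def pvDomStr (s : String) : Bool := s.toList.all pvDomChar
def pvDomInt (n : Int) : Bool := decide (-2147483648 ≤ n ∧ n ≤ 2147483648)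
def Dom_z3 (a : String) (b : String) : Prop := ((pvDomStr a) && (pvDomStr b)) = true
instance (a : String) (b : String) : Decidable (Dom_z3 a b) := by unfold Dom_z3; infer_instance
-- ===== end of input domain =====

-- B inverts the traversal: instead of A's scan-and-remove over the inputs against a mutable
-- candidate list, B makes one pass over the fixed 52-letter alphabet and keeps the letters
-- absent from the concatenated inputs (objective: simpler).


-- ===== PORT A =====
-- inner loop 'for literab in slowo: if literaa == literab: slowo.remove(literaa); break':
-- scan slowo, remove the first element equal to literaa (nothing if no match)
def pvRemoveFirst : List String → String → List String
  | [], _ => []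
  | x :: xs, c => if c == x then xs else x :: pvRemoveFirst xs c

def z3 (a : String) (b : String) : List String :=
  -- slowo += chr(litera) + chr(litera).upper() appends the two 1-char strings separately
  let slowo := (PySem.List.pyRange 97 123 1).foldl
      (fun acc l =>
        acc ++ [String.ofList [Char.ofNat l.toNat], PySem.Str.upper (String.ofList [Char.ofNat l.toNat])]) []
  let final := [a, b].foldl
      (fun s zdanie => zdanie.toList.foldl (fun s c => pvRemoveFirst s (String.ofList [c])) s) slowo
  PySem.Set.ofList final

-- ===== PORT B =====
-- 'c not in s' on a 1-char string c is exactly char membership among s's characters (exact)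
def z3_alt (a : String) (b : String) : List String :=
  let s : List Char := a.toList ++ b.toList
  PySem.Set.ofList
    ((((PySem.List.pyRange 97 123 1).flatMap
        (fun k => [Char.ofNat k.toNat, Char.ofNat (k - 32).toNat])).filter
       (fun c => ! s.contains c)).map (fun c => String.ofList [c]))

-- ===== PRECONDITION & SPEC =====
def Spec_z3 (a : String) (b : String) (out : List String) : Prop := out = z3_alt a b
instance (a : String) (b : String) (out : List String) : Decidable (Spec_z3 a b out) := by unfold Spec_z3; infer_instance

-- ===== CLAIM (what is proved, stated in full; the proofs are below) =====
def Claim_equal_z3 : Prop := ∀ (a : String) (b : String), Dom_z3 a b → Spec_z3 a b (z3 a b)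

-- ===== LEMMAS AND PROOFS =====

-- the fixed 52-letter candidate alphabet, at char level (= B's generator)
def pvAlpha : List Char :=
  (PySem.List.pyRange 97 123 1).flatMap (fun k => [Char.ofNat k.toNat, Char.ofNat (k - 32).toNat])

-- A's initial candidate list is that alphabet as singleton strings
lemma pvSlowoInit_eq :
    ((PySem.List.pyRange 97 123 1).foldl
      (fun acc l =>
        acc ++ [String.ofList [Char.ofNat l.toNat], PySem.Str.upper (String.ofList [Char.ofNat l.toNat])]) [])
      = pvAlpha.map (fun c => String.ofList [c]) := by
  decide

lemma pvAlpha_nodup : (pvAlpha.map (fun c => String.ofList [c])).Nodup := by decide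

lemma pvSingleton_beq (x c : Char) :
    (String.ofList [x] == String.ofList [c]) = (x == c) := by
  cases hc : x == c
  · have hne : String.ofList [x] ≠ String.ofList [c] := by
      intro h
      have h2 := congrArg String.toList h
      simp at h2
      exact absurd h2 (by simpa using hc)
    simpa using hne
  · have : x = c := by simpa using hc
    simp [this]

-- list.remove of the first match, on a duplicate-free list, is a filter
lemma pvRemoveFirst_eq_filter (l : List String) (c : String) (h : l.Nodup) :
    pvRemoveFirst l c = l.filter (fun x => !(x == c)) := by
  induction l with
  | nil => rfl
  | cons x xs ih =>
    rcases List.nodup_cons.mp h with ⟨hx, hxs⟩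
    by_cases hc : c = x
    · subst hc
      have hf : List.filter (fun x => !(x == c)) xs = xs :=
        List.filter_eq_self.mpr (fun a ha => by
          cases hac : a == c
          · rfl
          · exact absurd (by simpa [show a = c by simpa using hac] using ha) hx)
      simp [pvRemoveFirst, hf]
    · have hb : (c == x) = false := beq_false_of_ne hc
      simp [pvRemoveFirst, hb, ih hxs, Ne.symm hc, beq_false_of_ne]

-- folding A's scan-and-remove over all input characters filters out the matched letters
lemma pvProcess_eq_filter (cs : List Char) (l : List String) (h : l.Nodup) :
    cs.foldl (fun s c => pvRemoveFirst s (String.ofList [c])) l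
      = l.filter (fun x => !(cs.any (fun c => x == String.ofList [c]))) := by
  induction cs generalizing l with
  | nil => simp
  | cons c cs ih =>
    rw [List.foldl_cons, pvRemoveFirst_eq_filter l _ h, ih _ (h.filter _), List.filter_filter]
    apply List.filter_congr
    intro x _
    cases hx : x == String.ofList [c] <;> simp [hx]

-- the string-level filter over the alphabet is B's char-level filter, mapped to strings
lemma pvFilter_key (s : List Char) :
    (pvAlpha.map (fun c => String.ofList [c])).filter
        (fun x => !(s.any (fun c => x == String.ofList [c])))
      = (pvAlpha.filter (fun c => !(s.contains c))).map (fun c => String.ofList [c]) := by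
  rw [List.filter_map]
  congr 1
  apply List.filter_congr
  intro c _
  simp only [Function.comp, pvSingleton_beq, List.contains_eq_any_beq]

-- ===== VERDICT (by name: the statement is the Claim_ definition above) =====
theorem z3_spec : Claim_equal_z3 := by
  intro a b _
  simp only [Spec_z3, z3, z3_alt, List.foldl_cons, List.foldl_nil, ← List.foldl_append]
  rw [pvSlowoInit_eq, pvProcess_eq_filter _ _ pvAlpha_nodup, pvFilter_key]
  rfl
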